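-- pv_equiv track=rewrite | github.com/dwtaylor99/ScheduleScroller | botquote.py | torgo_say
-- ===== SOURCE A (Python) =====
-- def torgo_say(s):
--     text = ""
--
--     # alter name capitalization
--     c_index = 0
--     for i in range(0, len(s)):
--         if "A" <= s[i] <= "Z" or "a" <= s[i] <= "z":
--             if c_index % 2 == 1:
--                 text += s[i].upper()
--             else:
--                 text += s[i].lower()
--             c_index += 1
--         elif s[i] == " ":
--             text += s[i]
--             c_index = 0
--         else:
--             text += s[i]
--
--     # scan for emotes are fix them
--     orig_words = s.split()
--     words = text.split()
--     for i, w in enumerate(words):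
--         if w.lower().startswith("mst3k"):
--             words[i] = orig_words[i]
--
--     text = " ".join(words)
--
--     return text
-- ===== SOURCE B (Python) =====
-- def torgo_say(s):
--     out_segs = []
--     for seg in s.split(" "):
--         letters = [i for i, ch in enumerate(seg) if ch.isalpha()]
--         upp = {p for j, p in enumerate(letters) if j % 2 == 1}
--         out_segs.append("".join(
--             ch.upper() if i in upp else (ch.lower() if ch.isalpha() else ch)
--             for i, ch in enumerate(seg)))
--     cased = " ".join(out_segs)
--     return " ".join(o if w.lower().startswith("mst3k") else w
--                     for w, o in zip(cased.split(), s.split()))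
-- ===== Notes on version B (the rewrite author's own statement) =====
-- stated objective: alternative
-- what changed: A's single stateful character scan with a case counter reset on spaces (plus an index-mutation loop over the word list) is replaced by a counter-free staged computation: per space-segment, collect the index positions of alphabetic characters, take the odd-indexed positions as an uppercase set, and render each character by set membership; the emote restore becomes a zip comprehension.
import Mathlib
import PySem

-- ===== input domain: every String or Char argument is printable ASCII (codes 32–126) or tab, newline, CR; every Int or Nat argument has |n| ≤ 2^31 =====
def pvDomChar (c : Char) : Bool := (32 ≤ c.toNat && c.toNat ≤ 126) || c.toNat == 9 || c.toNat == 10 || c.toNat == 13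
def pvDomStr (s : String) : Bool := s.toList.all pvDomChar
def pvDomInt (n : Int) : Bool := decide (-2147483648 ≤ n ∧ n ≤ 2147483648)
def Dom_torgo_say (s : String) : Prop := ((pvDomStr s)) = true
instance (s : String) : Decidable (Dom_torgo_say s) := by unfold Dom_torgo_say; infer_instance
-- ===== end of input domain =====

-- B replaces A's stateful character scan (case counter reset on spaces) by a counter-free
-- staged computation per space-segment: collect the positions of alphabetic characters,
-- take the odd-indexed positions as an uppercase set, render by set membership; the emote
-- restore becomes a zip comprehension (objective: alternative algorithm, same cost).


-- ===== PORT A =====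

-- one step of A's `for i in range(0, len(s))` loop; state = (text, c_index)
def caseStepA (st : List Char × Nat) (c : Char) : List Char × Nat :=
  if ('A' ≤ c ∧ c ≤ 'Z') ∨ ('a' ≤ c ∧ c ≤ 'z') then
    (st.1 ++ [if st.2 % 2 == 1 then PySem.Chars.upperChar c else PySem.Chars.lowerChar c], st.2 + 1)
  else if c = ' ' then (st.1 ++ [c], 0)
  else (st.1 ++ [c], st.2)

-- one step of A's `for i, w in enumerate(words)` loop mutating the words list
def fixStepA (orig : List (List Char)) (ws : List (List Char)) (iw : Int × List Char) : List (List Char) :=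
  if PySem.Chars.startswith (PySem.Chars.lower iw.2) "mst3k".toList then
    match PySem.List.pyGet? orig iw.1 with
    | some o => PySem.List.pySetD ws iw.1 o
    | none => ws   -- IndexError in Python; unreachable: both splits always have equal length (proved below)
  else ws

def torgo_say (s : String) : String :=
  let text := (s.toList.foldl caseStepA ([], 0)).1
  let origWords := PySem.Chars.split₀ s.toList
  let words := PySem.Chars.split₀ text
  let words := (PySem.List.enumerate words 0).foldl (fixStepA origWords) words
  String.ofList (PySem.Chars.join [' '] words)

-- ===== PORT B =====

-- Source B's per-segment body: positions of alphabetic characters, odd-indexed ones become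
-- the uppercase set, then render each enumerated character by set membership
def bUpp (seg : List Char) : PySem.Set Int :=
  PySem.Set.ofList
    (((PySem.List.enumerate
        (((PySem.List.enumerate seg 0).filter (fun p => PySem.Chars.isalpha p.2)).map (·.1))
        0).filter (fun q => PySem.Int.mod q.1 2 == 1)).map (·.2))

def bSeg (seg : List Char) : List Char :=
  (PySem.List.enumerate seg 0).map (fun p =>
    if PySem.Set.contains (bUpp seg) p.1 then PySem.Chars.upperChar p.2
    else if PySem.Chars.isalpha p.2 then PySem.Chars.lowerChar p.2
    else p.2)

def torgo_say_alt (s : String) : String :=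
  let cased := PySem.Chars.join [' '] ((PySem.Chars.splitOn s.toList [' ']).map bSeg)
  let pairs := (PySem.Chars.split₀ cased).zip (PySem.Chars.split₀ s.toList)
  String.ofList (PySem.Chars.join [' ']
    (pairs.map (fun wo =>
      if PySem.Chars.startswith (PySem.Chars.lower wo.1) "mst3k".toList then wo.2 else wo.1)))

-- ===== PRECONDITION & SPEC =====
def Spec_torgo_say (s : String) (out : String) : Prop := out = torgo_say_alt s
instance (s : String) (out : String) : Decidable (Spec_torgo_say s out) := by unfold Spec_torgo_say; infer_instance

-- ===== CLAIM (what is proved, stated in full; the proofs are below) =====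
def Claim_equal_torgo_say : Prop := ∀ (s : String), Dom_torgo_say s → Spec_torgo_say s (torgo_say s)

-- ===== LEMMAS AND PROOFS =====

-- reference recasing of one space-free segment with a letter counter (proof-only)
def altCase (seg : List Char) (k : Nat) : List Char :=
  match seg with
  | [] => []
  | c :: cs =>
    if PySem.Chars.isalpha c then
      (if k % 2 == 1 then PySem.Chars.upperChar c else PySem.Chars.lowerChar c) :: altCase cs (k + 1)
    else c :: altCase cs k

-- positions of alphabetic characters of seg, offset by n
def lpos (seg : List Char) (n : Int) : List Int :=
  match seg with
  | [] => []
  | c :: cs => if PySem.Chars.isalpha c then n :: lpos cs (n + 1) else lpos cs (n + 1)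

-- every second element, starting with the second (b = take the head?)
def sel {α : Type} (b : Bool) (l : List α) : List α :=
  match l with
  | [] => []
  | x :: r => if b then x :: sel (!b) r else sel (!b) r

theorem lp_ge (seg : List Char) (n : Int) (x : Int) (h : x ∈ lpos seg n) : n ≤ x := by
  induction seg generalizing n with
  | nil => simp [lpos] at h
  | cons c cs ih =>
    simp only [lpos] at h
    split_ifs at h with hc
    · rcases List.mem_cons.mp h with rfl | h2
      · exact le_refl x
      · exact le_trans (by omega) (ih (n + 1) h2)
    · exact le_trans (by omega) (ih (n + 1) h)

theorem sel_subset {α : Type} (b : Bool) (l : List α) (x : α) (h : x ∈ sel b l) : x ∈ l := by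
  induction l generalizing b with
  | nil => simp [sel] at h
  | cons y r ih =>
    simp only [sel] at h
    split_ifs at h with hb
    · rcases List.mem_cons.mp h with rfl | h2
      · exact List.mem_cons_self
      · exact List.mem_cons_of_mem _ (ih (!b) h2)
    · exact List.mem_cons_of_mem _ (ih (!b) h)

-- Source B's letters list is lpos
theorem letters_eq (seg : List Char) (n : Int) :
    ((PySem.List.enumerate seg n).filter (fun p => PySem.Chars.isalpha p.2)).map (·.1)
      = lpos seg n := by
  induction seg generalizing n with
  | nil => simp [PySem.List.enumerate, lpos]
  | cons c cs ih =>
    rw [PySem.List.enumerate_cons]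
    by_cases hc : PySem.Chars.isalpha c = true
    · simp [hc, lpos, ih]
    · simp [hc, lpos, ih]

-- Source B's odd-index selection is sel
theorem odds_eq (l : List Int) (n : Int) :
    ((PySem.List.enumerate l n).filter (fun q => PySem.Int.mod q.1 2 == 1)).map (·.2)
      = sel (PySem.Int.mod n 2 == 1) l := by
  induction l generalizing n with
  | nil => simp [PySem.List.enumerate, sel]
  | cons x r ih =>
    rw [PySem.List.enumerate_cons, List.filter_cons]
    have hmod : PySem.Int.mod n 2 = n % 2 := by
      simp only [PySem.Int.mod]; rw [Int.fmod_eq_emod]; simp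
    have hmod1 : PySem.Int.mod (n + 1) 2 = (n + 1) % 2 := by
      simp only [PySem.Int.mod]; rw [Int.fmod_eq_emod]; simp
    by_cases hb : PySem.Int.mod n 2 = 1
    · have hbt : (PySem.Int.mod n 2 == 1) = true := by rw [hb]; rfl
      have hflip : (PySem.Int.mod (n + 1) 2 == 1) = false := by
        rw [hmod1]; rw [hmod] at hb
        simp only [beq_iff_eq, Bool.eq_false_iff, ne_eq]
        omega
      rw [hmod] at hb
      simp only [hbt, if_true, List.map_cons, ih, hflip, sel, Bool.not_true]
    · have hbt : (PySem.Int.mod n 2 == 1) = false := by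
        simp only [beq_eq_false_iff_ne, ne_eq]; exact hb
      have hflip : (PySem.Int.mod (n + 1) 2 == 1) = true := by
        rw [hmod1]; rw [hmod] at hb
        simp only [beq_iff_eq]
        omega
      rw [hmod] at hb
      simp only [hbt, Bool.false_eq_true, if_false, ih, hflip, sel, Bool.not_false]

-- the membership render equals the counter recasing, given the set describes sel of lpos
theorem render_eq (seg : List Char) (n : Int) (k : Nat) (S : List Int)
    (h : ∀ i : Int, n ≤ i → (i ∈ S ↔ i ∈ sel (k % 2 == 1) (lpos seg n))) :
    (PySem.List.enumerate seg n).map (fun p =>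
      if PySem.Set.contains S p.1 then PySem.Chars.upperChar p.2
      else if PySem.Chars.isalpha p.2 then PySem.Chars.lowerChar p.2
      else p.2) = altCase seg k := by
  induction seg generalizing n k with
  | nil => simp [PySem.List.enumerate, altCase]
  | cons c cs ih =>
    rw [PySem.List.enumerate_cons, List.map_cons]
    have hparflip : ((k + 1) % 2 == 1) = !(k % 2 == 1) := by
      by_cases h2 : k % 2 = 1
      · have : (k + 1) % 2 = 0 := by omega
        simp [h2, this]
      · have h0 : k % 2 = 0 := by omega
        have : (k + 1) % 2 = 1 := by omega
        simp [h0, this]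
    by_cases hc : PySem.Chars.isalpha c = true
    · have hlp : lpos (c :: cs) n = n :: lpos cs (n + 1) := by simp [lpos, hc]
      by_cases hk : (k % 2 == 1) = true
      · -- head letter is uppercased
        have hmem : n ∈ S := by
          rw [h n (le_refl n), hlp, hk]
          simp [sel]
        rw [ih (n + 1) (k + 1) ?_]
        · simp [altCase, hc, hk, hmem]
        · intro i hi
          rw [h i (by omega), hlp, hparflip, hk]
          simp only [Bool.not_true, sel, if_true, List.mem_cons]
          constructor
          · rintro (rfl | h2)
            · exact absurd hi (by omega)
            · exact h2
          · exact Or.inr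
      · -- head letter is lowercased
        have hk' : (k % 2 == 1) = false := by rwa [Bool.not_eq_true] at hk
        have hnmem : n ∉ S := by
          rw [h n (le_refl n), hlp, hk']
          intro hmem
          simp only [sel, Bool.false_eq_true, if_false, Bool.not_false] at hmem
          have := lp_ge cs (n + 1) n (sel_subset _ _ _ hmem)
          omega
        rw [ih (n + 1) (k + 1) ?_]
        · simp [altCase, hc, hk', hnmem]
        · intro i hi
          rw [h i (by omega), hlp, hparflip, hk']
          simp [sel]
    · -- head not a letter: passed through, counter/set unchanged
      have hlp : lpos (c :: cs) n = lpos cs (n + 1) := by simp [lpos, hc]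
      have hnmem : n ∉ S := by
        rw [h n (le_refl n), hlp]
        intro hmem
        have := lp_ge cs (n + 1) n (sel_subset _ _ _ hmem)
        omega
      rw [ih (n + 1) k ?_]
      · simp [altCase, hc, hnmem]
      · intro i hi
        rw [h i (by omega), hlp]

theorem bSeg_eq_altCase (seg : List Char) : bSeg seg = altCase seg 0 := by
  unfold bSeg bUpp
  rw [letters_eq, odds_eq]
  apply render_eq
  intro i _
  rw [show (PySem.Int.mod 0 2 == 1) = false by decide,
      show (((0 : Nat) % 2) == 1) = false by decide]
  exact PySem.Set.mem_ofList _ _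

-- A's casing loop as a plain forward recursion
def caseRec (cs : List Char) (k : Nat) : List Char :=
  match cs with
  | [] => []
  | c :: rest =>
    if ('A' ≤ c ∧ c ≤ 'Z') ∨ ('a' ≤ c ∧ c ≤ 'z') then
      (if k % 2 == 1 then PySem.Chars.upperChar c else PySem.Chars.lowerChar c) :: caseRec rest (k + 1)
    else if c = ' ' then c :: caseRec rest 0
    else c :: caseRec rest k

theorem foldl_caseStepA (cs : List Char) (text : List Char) (k : Nat) :
    (cs.foldl caseStepA (text, k)).1 = text ++ caseRec cs k := by
  induction cs generalizing text k with
  | nil => simp [caseRec]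
  | cons c rest ih =>
    simp only [List.foldl_cons, caseStepA, caseRec]
    split_ifs with h1 h2 <;> rw [ih] <;> simp [List.append_assoc]

-- split-on-single-space as a simple recursion: (first segment, remaining segments)
def spSp (cs : List Char) : List Char × List (List Char) :=
  match cs with
  | [] => ([], [])
  | c :: rest =>
    if c = ' ' then ([], (spSp rest).1 :: (spSp rest).2)
    else (c :: (spSp rest).1, (spSp rest).2)

theorem splitOn_go_sp (fuel : Nat) (l cur : List Char) (acc : List (List Char))
    (h : l.length < fuel) :
    PySem.Chars.splitOn.go [' '] fuel l cur acc =
      acc.reverse ++ ((cur.reverse ++ (spSp l).1) :: (spSp l).2) := by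
  induction fuel generalizing l cur acc with
  | zero => omega
  | succ fuel ih =>
    match l with
    | [] => rw [PySem.Chars.splitOn.go.eq_def]; simp [spSp]
    | c :: rest =>
      rw [PySem.Chars.splitOn.go.eq_def]
      simp only []
      by_cases hc : c = ' '
      · subst hc
        have hpre : [' '].isPrefixOf (' ' :: rest) = true := by simp [List.isPrefixOf]
        simp only [hpre, if_pos, List.length_cons, List.length_nil, Nat.zero_add,
          List.drop_succ_cons, List.drop_zero] at *
        rw [ih rest [] (cur.reverse :: acc) (by omega)]
        simp [spSp]
      · have hpre : [' '].isPrefixOf (c :: rest) = false := by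
          simp [List.isPrefixOf]; exact fun hh => (hc hh.symm).elim
        simp only [hpre]
        rw [if_neg (by simp)]
        rw [ih rest (c :: cur) acc (by simpa using Nat.lt_of_succ_lt_succ h)]
        simp [spSp, hc]

theorem splitOn_sp (cs : List Char) :
    PySem.Chars.splitOn cs [' '] = (spSp cs).1 :: (spSp cs).2 := by
  unfold PySem.Chars.splitOn
  rw [splitOn_go_sp cs.length.succ cs [] [] (Nat.lt_succ_self _)]
  simp

-- join with a single space, in flat form
theorem join_space_cons (x : List Char) (xs : List (List Char)) :
    PySem.Chars.join [' '] (x :: xs) = x ++ xs.flatMap (fun y => ' ' :: y) := by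
  induction xs generalizing x with
  | nil => simp [PySem.Chars.join, List.intercalate]
  | cons y ys ih =>
    rw [PySem.Chars.join_cons_cons, ih y]
    simp

-- isalpha agrees with A's explicit range test
theorem isalpha_iff (c : Char) :
    PySem.Chars.isalpha c = true ↔ (('A' ≤ c ∧ c ≤ 'Z') ∨ ('a' ≤ c ∧ c ≤ 'z')) := by
  simp [PySem.Chars.isalpha, PySem.Chars.isupper, PySem.Chars.islower]

-- A's casing fold equals the per-segment recasing, segment-wise
theorem caseRec_eq_sp (cs : List Char) (k : Nat) :
    caseRec cs k = altCase (spSp cs).1 k ++ ((spSp cs).2).flatMap (fun seg => ' ' :: altCase seg 0) := by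
  induction cs generalizing k with
  | nil => simp [caseRec, spSp, altCase]
  | cons c rest ih =>
    by_cases ha : ('A' ≤ c ∧ c ≤ 'Z') ∨ ('a' ≤ c ∧ c ≤ 'z')
    · have hsp : ¬ c = ' ' := by
        rintro rfl
        rcases ha with ⟨h1, h2⟩ | ⟨h1, h2⟩ <;> exact absurd h1 (by decide)
      simp only [caseRec, spSp, if_pos ha, if_neg hsp, altCase,
        if_pos ((isalpha_iff c).mpr ha)]
      simp [ih]
    · by_cases hsp : c = ' '
      · subst hsp
        simp only [caseRec, spSp, if_neg ha]
        simp [ih 0, altCase]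
      · have hna : PySem.Chars.isalpha c = false := by
          rcases hh : PySem.Chars.isalpha c with _ | _
          · rfl
          · exact absurd ((isalpha_iff c).mp hh) ha
        simp only [caseRec, spSp, if_neg ha, if_neg hsp, altCase, hna]
        simp [ih]

theorem isspace_lowerChar (c : Char) :
    PySem.Chars.isspace (PySem.Chars.lowerChar c) = PySem.Chars.isspace c := by
  unfold PySem.Chars.lowerChar
  by_cases h : PySem.Chars.isupper c = true
  · simp only [h, if_true]
    simp only [PySem.Chars.isupper, Bool.and_eq_true, decide_eq_true_eq] at h
    have h1 : 65 ≤ c.toNat := h.1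
    have h2 : c.toNat ≤ 90 := h.2
    have hv : (c.toNat + 32).isValidChar := by constructor; omega
    have ht : (Char.ofNat (c.toNat + 32)).toNat = c.toNat + 32 := by
      simp [Char.toNat_ofNat, hv]
    have hA : PySem.Chars.isspace c = false := by
      simp [PySem.Chars.isspace]; omega
    have hB : PySem.Chars.isspace (Char.ofNat (c.toNat + 32)) = false := by
      simp [PySem.Chars.isspace, ht]; omega
    rw [hA, hB]
  · simp [h]

theorem isspace_upperChar (c : Char) :
    PySem.Chars.isspace (PySem.Chars.upperChar c) = PySem.Chars.isspace c := by
  unfold PySem.Chars.upperChar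
  by_cases h : PySem.Chars.islower c = true
  · simp only [h, if_true]
    simp only [PySem.Chars.islower, Bool.and_eq_true, decide_eq_true_eq] at h
    have h1 : 97 ≤ c.toNat := h.1
    have h2 : c.toNat ≤ 122 := h.2
    have hv : (c.toNat - 32).isValidChar := by constructor; omega
    have ht : (Char.ofNat (c.toNat - 32)).toNat = c.toNat - 32 := by
      simp [Char.toNat_ofNat, hv]
    have hA : PySem.Chars.isspace c = false := by
      simp [PySem.Chars.isspace]; omega
    have hB : PySem.Chars.isspace (Char.ofNat (c.toNat - 32)) = false := by
      simp [PySem.Chars.isspace, ht]; omega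
    rw [hA, hB]
  · simp [h]

-- recasing never changes which characters are whitespace
theorem isspace_caseRec (cs : List Char) (k : Nat) :
    (caseRec cs k).map PySem.Chars.isspace = cs.map PySem.Chars.isspace := by
  induction cs generalizing k with
  | nil => rfl
  | cons c rest ih =>
    by_cases ha : ('A' ≤ c ∧ c ≤ 'Z') ∨ ('a' ≤ c ∧ c ≤ 'z')
    · have hcase : PySem.Chars.isspace
          (if k % 2 == 1 then PySem.Chars.upperChar c else PySem.Chars.lowerChar c)
          = PySem.Chars.isspace c := by
        split_ifs
        · exact isspace_upperChar c
        · exact isspace_lowerChar c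
      simp only [caseRec, if_pos ha, List.map_cons, ih, hcase]
    · by_cases hsp : c = ' '
      · subst hsp; simp [caseRec, ih]
      · simp [caseRec, ha, hsp, ih]

-- equal whitespace masks give equally many whitespace-separated words
theorem split₀_go_length (cs ds cur cur' : List Char) (acc acc' : List (List Char))
    (h : cs.map PySem.Chars.isspace = ds.map PySem.Chars.isspace)
    (hc : cur.isEmpty = cur'.isEmpty) (ha : acc.length = acc'.length) :
    (PySem.Chars.split₀.go cs cur acc).length = (PySem.Chars.split₀.go ds cur' acc').length := by
  induction cs generalizing ds cur cur' acc acc' with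
  | nil =>
    match ds with
    | [] =>
      rw [PySem.Chars.split₀.go.eq_def, PySem.Chars.split₀.go.eq_def]
      simp only [hc]
      split_ifs <;> simp [ha]
    | d :: _ => simp at h
  | cons c rest ih =>
    match ds with
    | [] => simp at h
    | d :: rest' =>
      simp only [List.map_cons, List.cons.injEq] at h
      rw [PySem.Chars.split₀.go.eq_def, PySem.Chars.split₀.go.eq_def]
      simp only [h.1, hc]
      split_ifs with hs he
      · exact ih rest' [] [] acc acc' h.2 rfl ha
      · exact ih rest' [] [] _ _ h.2 rfl (by simp [ha])
      · exact ih rest' (c :: cur) (d :: cur') acc acc' h.2 (by simp) ha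

theorem split₀_length_congr (cs ds : List Char)
    (h : cs.map PySem.Chars.isspace = ds.map PySem.Chars.isspace) :
    (PySem.Chars.split₀ cs).length = (PySem.Chars.split₀ ds).length := by
  unfold PySem.Chars.split₀
  exact split₀_go_length cs ds [] [] [] [] h rfl rfl

-- the emote word as condition, shared by both ports
def emoteCond (w : List Char) : Bool :=
  PySem.Chars.startswith (PySem.Chars.lower w) "mst3k".toList

-- A's index-mutation loop equals B's zip comprehension when the lists have equal length
theorem fix_loop_eq (tail pref orig : List (List Char))
    (h : pref.length + tail.length = orig.length) :
    (PySem.List.enumerate tail (pref.length : Int)).foldl (fixStepA orig) (pref ++ tail) =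
      pref ++ (tail.zip (orig.drop pref.length)).map
        (fun wo => if emoteCond wo.1 then wo.2 else wo.1) := by
  induction tail generalizing pref with
  | nil => simp [PySem.List.enumerate]
  | cons w rest ih =>
    rw [PySem.List.enumerate_cons, List.foldl_cons]
    have hlt : pref.length < orig.length := by simp at h; omega
    have hdrop : orig.drop pref.length = orig[pref.length] :: orig.drop (pref.length + 1) :=
      List.drop_eq_getElem_cons hlt
    have hset : fixStepA orig (pref ++ w :: rest) ((pref.length : Int), w) =
        pref ++ (if emoteCond w then orig[pref.length] else w) :: rest := by
      unfold fixStepA emoteCond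
      split_ifs with hcond
      · have : PySem.List.pyGet? orig ((pref.length : Nat) : Int) = some orig[pref.length] := by
          simp [PySem.List.pyGet?, PySem.List.pyIdx?, hlt]
        simp only [this, PySem.List.pySetD_natCast]
        rw [List.set_append_right _ _ (Nat.le_refl _)]
        simp
      · rfl
    rw [hset]
    have h2 : (pref ++ [if emoteCond w then orig[pref.length] else w]).length + rest.length
        = orig.length := by simp at h ⊢; omega
    have hstep := ih (pref ++ [if emoteCond w then orig[pref.length] else w]) h2
    rw [show pref ++ (if emoteCond w then orig[pref.length] else w) :: rest
          = (pref ++ [if emoteCond w then orig[pref.length] else w]) ++ rest by simp]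
    rw [show ((pref.length : Int) + 1)
          = ((pref ++ [if emoteCond w then orig[pref.length] else w]).length : Int) by
        push_cast [List.length_append, List.length_cons, List.length_nil]; ring]
    rw [hstep]
    conv_rhs => rw [hdrop]
    simp [List.append_assoc, -List.getElem_cons_drop]

-- B's cased text equals A's cased text
theorem cased_eq (cs : List Char) :
    PySem.Chars.join [' '] ((PySem.Chars.splitOn cs [' ']).map bSeg) = caseRec cs 0 := by
  have hmap : ∀ l : List (List Char), l.map bSeg = l.map (altCase · 0) :=
    fun l => List.map_congr_left (fun seg _ => bSeg_eq_altCase seg)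
  rw [hmap, splitOn_sp]
  simp only [List.map_cons]
  rw [join_space_cons, caseRec_eq_sp]
  simp [List.flatMap_map]

-- ===== VERDICT (by name: the statement is the Claim_ definition above) =====
theorem torgo_say_spec : Claim_equal_torgo_say := by
  intro s _
  unfold Spec_torgo_say torgo_say torgo_say_alt
  simp only [cased_eq]
  have htext : (s.toList.foldl caseStepA ([], 0)).1 = caseRec s.toList 0 := by
    rw [foldl_caseStepA]; simp
  rw [htext]
  have hlen : (PySem.Chars.split₀ (caseRec s.toList 0)).length
      = (PySem.Chars.split₀ s.toList).length := by
    exact split₀_length_congr _ _ (isspace_caseRec s.toList 0)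
  have := fix_loop_eq (PySem.Chars.split₀ (caseRec s.toList 0)) []
    (PySem.Chars.split₀ s.toList) (by simpa using hlen)
  simp only [List.nil_append, List.length_nil, Nat.cast_zero, List.drop_zero] at this
  rw [this]
  simp only [emoteCond]
  rfl
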